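-- pv_equiv track=rewrite | github.com/knishant09/LearningPythonWorks | key_val_dependencies.py | dict_passval
-- ===== SOURCE A (Python) =====
-- def dict_passval(s_dict, k):
--
--
--     list_1 = []
--     if k not in s_dict:
--         list_1.append(k)
--     else:
--         for v in s_dict.get(k):
--             list_1.extend(dict_passval(s_dict, v))
--     return list_1
-- ===== SOURCE B (Python) =====
-- def dict_passval(s_dict, k):
--     result = []
--     stack = [k]
--     while stack:
--         node = stack.pop()
--         if node not in s_dict:
--             result.append(node)
--         else:
--             stack.extend(reversed(list(s_dict[node])))
--     return result
-- ===== Notes on version B (the rewrite author's own statement) =====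
-- stated objective: alternative
-- what changed: Replaces A's recursive preorder traversal by an iterative DFS with an explicit stack (children pushed in reversed order to keep A's left-to-right leaf order), avoiding Python's recursion-depth limit.
import Mathlib
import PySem

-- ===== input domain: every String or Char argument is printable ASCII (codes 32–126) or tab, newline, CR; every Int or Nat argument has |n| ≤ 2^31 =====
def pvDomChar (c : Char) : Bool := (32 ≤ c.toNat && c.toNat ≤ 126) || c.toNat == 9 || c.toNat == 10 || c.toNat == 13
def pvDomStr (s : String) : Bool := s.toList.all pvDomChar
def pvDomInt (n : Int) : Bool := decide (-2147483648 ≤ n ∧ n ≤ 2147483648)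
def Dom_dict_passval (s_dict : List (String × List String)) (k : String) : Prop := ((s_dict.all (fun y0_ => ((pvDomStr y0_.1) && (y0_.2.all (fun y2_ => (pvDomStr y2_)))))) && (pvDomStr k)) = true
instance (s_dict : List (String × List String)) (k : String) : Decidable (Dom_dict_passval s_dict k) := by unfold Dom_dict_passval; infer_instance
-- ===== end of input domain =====

-- B replaces A's recursive preorder leaf collection by an iterative DFS with an explicit stack
-- (objective: alternative — no asymptotic change, no Python recursion-depth limit).
-- Pre_ excludes exactly the inputs on which neither Python returns: when the part of the
-- dependency graph reachable from k has a cycle, A raises RecursionError and B loops forever.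
-- The Lean ports carry a depth-fuel totality guard that never fires under Pre_.

-- ===== PORT A =====
-- 's_dict.get(k)' : value of the first (only) entry with key k
def pvLook (s : List (String × List String)) (k : String) : List String :=
  ((s.find? (fun p => p.1 == k)).map Prod.snd).getD []

-- A's recursion, with a Nat recursion-depth fuel as totality guard (fuel 0 returns [] and is
-- never reached under Pre_dict_passval with the initial fuel s.length + 1)
def pvGoA (s : List (String × List String)) : Nat → String → List String
  | 0, _ => []
  | n + 1, k =>
    if s.any (fun p => p.1 == k) then
      (pvLook s k).foldl (fun acc v => acc ++ pvGoA s n v) []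
    else [k]

def dict_passval (s_dict : List (String × List String)) (k : String) : List String :=
  pvGoA s_dict (s_dict.length + 1) k

-- ===== PORT B =====
-- bound used only by the termination measure of the stack loop
def pvBase (s : List (String × List String)) : Nat := 2 + (s.map (fun p => p.2.length)).sum

theorem pvLook_len_le (s : List (String × List String)) (x : String)
    (hf : s.any (fun p => p.1 == x) = true) : (pvLook s x).length + 2 ≤ pvBase s := by
  have h' : (s.find? (fun p => p.1 == x)).isSome := by
    rw [List.find?_isSome]; simpa using hf
  obtain ⟨p, hp⟩ := Option.isSome_iff_exists.mp h'
  have hmem : p ∈ s := List.mem_of_find?_eq_some hp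
  have : p.2.length ≤ (s.map (fun p => p.2.length)).sum :=
    List.single_le_sum (by intro i _; exact Nat.zero_le i) _ (List.mem_map_of_mem hmem)
  simp only [pvLook, hp, Option.map_some, Option.getD_some, pvBase]
  omega

-- B's stack loop. The Python stack holds plain keys; here each stack entry carries a Nat
-- depth-fuel as totality guard (exhaustion returns acc, never reached under Pre_).
-- The Python list-stack pops from its end; this list keeps the top of the stack at the head,
-- so 'stack.extend(reversed(list(s_dict[node])))' becomes prepending the children in order.
def pvGoB (s : List (String × List String)) : List (Nat × String) → List String → List String
  | [], acc => acc
  | (d, x) :: st, acc =>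
    if h : s.any (fun p => p.1 == x) = true then
      match d with
      | 0 => acc
      | d' + 1 => pvGoB s ((pvLook s x).map (fun v => (d', v)) ++ st) acc
    else pvGoB s st (acc ++ [x])
termination_by st _ => (st.map (fun p => pvBase s ^ p.1)).sum
decreasing_by
  · have hb := pvLook_len_le s x h
    have hpos : 0 < pvBase s ^ d' := Nat.pow_pos (by unfold pvBase; omega)
    simp only [List.map_append, List.map_map, List.sum_append, List.map_cons, List.sum_cons]
    have : ((pvLook s x).map ((fun p => pvBase s ^ p.1) ∘ (fun v => (d', v)))).sum
        = (pvLook s x).length * pvBase s ^ d' := by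
      simp [Function.comp_def]
    rw [this]
    have : (pvLook s x).length * pvBase s ^ d' < pvBase s * pvBase s ^ d' :=
      (Nat.mul_lt_mul_right hpos).mpr (by omega)
    calc (pvLook s x).length * pvBase s ^ d' + (st.map (fun p => pvBase s ^ p.1)).sum
        < pvBase s * pvBase s ^ d' + (st.map (fun p => pvBase s ^ p.1)).sum := by omega
      _ = pvBase s ^ (d' + 1) + (st.map (fun p => pvBase s ^ p.1)).sum := by ring_nf
  · have hpos : 0 < pvBase s ^ d := Nat.pow_pos (by unfold pvBase; omega)
    simp only [List.map_cons, List.sum_cons]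
    omega

def dict_passval_alt (s_dict : List (String × List String)) (k : String) : List String :=
  pvGoB s_dict [(s_dict.length + 1, k)] []

-- ===== PRECONDITION & SPEC =====
-- Pre_ excludes exactly the inputs on which the part of the dependency graph reachable from k
-- is cyclic: there A raises RecursionError and B loops forever, so neither Python returns a
-- value.  Stated in closed form: some set R of keys that contains k (when k is a key) and is
-- closed under dependencies — hence contains everything reachable from k — is acyclic, i.e.
-- has no nonempty subset C in which every node keeps a dependency inside C.
def Pre_dict_passval (s_dict : List (String × List String)) (k : String) : Prop :=
  ∃ R ∈ ((s_dict.map Prod.fst).toFinset).powerset,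
    (s_dict.any (fun p => p.1 == k) = true → k ∈ R) ∧
    (∀ x ∈ R, ∀ v ∈ pvLook s_dict x, s_dict.any (fun p => p.1 == v) = true → v ∈ R) ∧
    (∀ C ∈ R.powerset, C ≠ ∅ → ∃ x ∈ C, ∀ v ∈ pvLook s_dict x, v ∉ C)
instance (s_dict : List (String × List String)) (k : String) : Decidable (Pre_dict_passval s_dict k) := by unfold Pre_dict_passval; infer_instance

def pvWitness_dict_passval : (List (String × List String)) × String :=
  ([("b", ["y", "y"]), ("a", ["b", "x"]), ("c", [])], "a")

def Spec_dict_passval (s_dict : List (String × List String)) (k : String) (out : List String) : Prop := out = dict_passval_alt s_dict k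
instance (s_dict : List (String × List String)) (k : String) (out : List String) : Decidable (Spec_dict_passval s_dict k out) := by unfold Spec_dict_passval; infer_instance

-- ===== CLAIM (what is proved, stated in full; the proofs are below) =====
def Claim_equal_dict_passval : Prop := ∀ (s_dict : List (String × List String)) (k : String), Dom_dict_passval s_dict k → Pre_dict_passval s_dict k → Spec_dict_passval s_dict k (dict_passval s_dict k)

-- ===== LEMMAS AND PROOFS =====

-- the set of KEYS reachable from k (saturates after s.length rounds; non-key leaves need no tracking)
def pvRch (s : List (String × List String)) (k : String) : Nat → Finset String
  | 0 => if s.any (fun p => p.1 == k) then {k} else ∅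
  | n + 1 => pvRch s k n ∪
      (pvRch s k n).biUnion
        (fun x => ((pvLook s x).filter (fun v => s.any (fun p => p.1 == v))).toFinset)

-- Kahn elimination restricted to the reachable keys: a key stays alive while it still has an
-- alive dependency; after s.length rounds the alive set is the cyclic core reachable from k
def pvAlive (s : List (String × List String)) (k : String) : Nat → Finset String
  | 0 => pvRch s k s.length
  | n + 1 => (pvAlive s k n).filter
      (fun x => (pvLook s x).any (fun v => decide (v ∈ pvAlive s k n)) = true)

theorem pvRch_step (s : List (String × List String)) (k : String) (n : Nat) :
    pvRch s k n ⊆ pvRch s k (n + 1) := fun x hx => by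
  show x ∈ pvRch s k n ∪ _
  exact Finset.mem_union_left _ hx

theorem pvRch_mono (s : List (String × List String)) (k : String) {m n : Nat} (h : m ≤ n) :
    pvRch s k m ⊆ pvRch s k n := by
  induction n, h using Nat.le_induction with
  | base => exact fun x hx => hx
  | succ n hn ih => exact fun x hx => pvRch_step s k n (ih hx)

theorem pvRch_stab (s : List (String × List String)) (k : String) {n : Nat}
    (h : pvRch s k n = pvRch s k (n + 1)) :
    ∀ m, n ≤ m → pvRch s k m = pvRch s k n := by
  intro m hm
  induction m, hm using Nat.le_induction with
  | base => rfl
  | succ m hm ih =>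
    have e : pvRch s k (m + 1) = pvRch s k (n + 1) := by
      show pvRch s k m ∪ _ = pvRch s k n ∪ _
      rw [ih]
    rw [e, ← h]

theorem pvRch_card_ge (s : List (String × List String)) (k : String) (n : Nat)
    (h : ∀ m < n, pvRch s k m ≠ pvRch s k (m + 1)) : n ≤ (pvRch s k n).card := by
  induction n with
  | zero => omega
  | succ n ih =>
    have h1 : n ≤ (pvRch s k n).card := ih (fun m hm => h m (by omega))
    have hss : pvRch s k n ⊂ pvRch s k (n + 1) :=
      Finset.ssubset_iff_subset_ne.mpr ⟨pvRch_mono s k (Nat.le_succ n), h n (by omega)⟩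
    have := Finset.card_lt_card hss
    omega

theorem pvRch_le_keys (s : List (String × List String)) (k : String) (n : Nat) :
    pvRch s k n ⊆ (s.map Prod.fst).toFinset := by
  induction n with
  | zero =>
    simp only [pvRch]
    split
    · next hk =>
      intro x hx
      rw [Finset.mem_singleton] at hx
      subst hx
      rw [List.mem_toFinset, List.mem_map]
      obtain ⟨p, hp, he⟩ := List.any_eq_true.mp hk
      exact ⟨p, hp, beq_iff_eq.mp he⟩
    · exact fun x hx => absurd hx (Finset.notMem_empty x)
  | succ n ih =>
    intro x hx
    simp only [pvRch, Finset.mem_union, Finset.mem_biUnion] at hx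
    rcases hx with hx | ⟨y, _, hx⟩
    · exact ih hx
    · rw [List.mem_toFinset, List.mem_filter] at hx
      rw [List.mem_toFinset, List.mem_map]
      obtain ⟨p, hp, he⟩ := List.any_eq_true.mp hx.2
      exact ⟨p, hp, beq_iff_eq.mp he⟩

theorem pvRch_fix (s : List (String × List String)) (k : String) :
    pvRch s k (s.length + 1) = pvRch s k s.length := by
  by_cases h : ∃ m, m < s.length + 1 ∧ pvRch s k m = pvRch s k (m + 1)
  · obtain ⟨m, hm, he⟩ := h
    rw [pvRch_stab s k he (s.length + 1) (by omega),
        pvRch_stab s k he s.length (by omega)]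
  · have hne : ∀ m < s.length + 1, pvRch s k m ≠ pvRch s k (m + 1) :=
      fun m hm he' => h ⟨m, hm, he'⟩
    have h1 := pvRch_card_ge s k (s.length + 1) hne
    have h2 := Finset.card_le_card (pvRch_le_keys s k (s.length + 1))
    have h3 : ((s.map Prod.fst).toFinset).card ≤ s.length := by
      calc ((s.map Prod.fst).toFinset).card ≤ (s.map Prod.fst).length := (s.map Prod.fst).toFinset_card_le
        _ = s.length := by simp
    omega

theorem pvRch_closed (s : List (String × List String)) (k : String) {x v : String}
    (hx : x ∈ pvRch s k s.length) (hv : v ∈ pvLook s x)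
    (hk : s.any (fun p => p.1 == v) = true) : v ∈ pvRch s k s.length := by
  rw [← pvRch_fix]
  show v ∈ pvRch s k s.length ∪ _
  refine Finset.mem_union_right _ (Finset.mem_biUnion.mpr ⟨x, hx, ?_⟩)
  rw [List.mem_toFinset, List.mem_filter]
  exact ⟨hv, hk⟩

theorem pvAlive_mono (s : List (String × List String)) (k : String) (n : Nat) :
    pvAlive s k (n + 1) ⊆ pvAlive s k n := Finset.filter_subset _ _

theorem pvAlive_down (s : List (String × List String)) (k : String) {m n : Nat} (h : m ≤ n) :
    pvAlive s k n ⊆ pvAlive s k m := by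
  induction n, h using Nat.le_induction with
  | base => exact fun x hx => hx
  | succ n hn ih => exact fun x hx => ih (pvAlive_mono s k n hx)

theorem pvAlive_empty (s : List (String × List String)) (k : String)
    (hp : pvAlive s k s.length = ∅) {n : Nat} (h : s.length ≤ n) : pvAlive s k n = ∅ := by
  have h2 := pvAlive_down s k h
  rw [hp] at h2
  exact Finset.subset_empty.mp h2

-- number of Kahn rounds x survives; the termination measure of both ports' proofs
def pvMu (s : List (String × List String)) (k x : String) : Nat :=
  (List.range (s.length + 1)).countP (fun n => decide (x ∈ pvAlive s k n))

theorem pvCountP_lt_le (n N : Nat) :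
    (List.range N).countP (fun m => decide (m < n)) ≤ min n N := by
  induction N with
  | zero => simp
  | succ N ih =>
    rw [List.range_succ, List.countP_append]
    have hs : List.countP (fun m => decide (m < n)) [N] = if N < n then 1 else 0 := by
      by_cases h : N < n <;> simp [h]
    rw [hs]
    split_ifs with h <;> omega

theorem pvMu_le (s : List (String × List String)) (k x : String)
    (hp : pvAlive s k s.length = ∅) : pvMu s k x ≤ s.length := by
  unfold pvMu
  rw [List.range_succ, List.countP_append]
  have he := hp
  have hL : (decide (x ∈ pvAlive s k s.length) : Bool) = false := by
    simp [he]
  have h1 : (List.range s.length).countP (fun n => decide (x ∈ pvAlive s k n)) ≤ s.length := by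
    calc (List.range s.length).countP (fun n => decide (x ∈ pvAlive s k n))
        ≤ (List.range s.length).length := List.countP_le_length
      _ = s.length := List.length_range
  simp only [List.countP_cons, List.countP_nil, hL, Bool.false_eq_true, if_false]
  omega

theorem pvMem_mu (s : List (String × List String)) (k x : String)
    (hp : pvAlive s k s.length = ∅) (n : Nat) : x ∈ pvAlive s k n ↔ n < pvMu s k x := by
  constructor
  · intro hx
    have hn : n < s.length := by
      by_contra hge
      rw [pvAlive_empty s k hp (by omega)] at hx
      exact absurd hx (Finset.notMem_empty x)
    have hall : (List.range (n + 1)).countP (fun m => decide (x ∈ pvAlive s k m)) = n + 1 := by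
      have h' : ∀ m ∈ List.range (n + 1), (fun m => decide (x ∈ pvAlive s k m)) m = true := by
        intro m hm
        rw [List.mem_range] at hm
        exact decide_eq_true (pvAlive_down s k (by omega) hx)
      rw [List.countP_eq_length.mpr h']
      simp
    have hsub : (List.range (n + 1)).Sublist (List.range (s.length + 1)) :=
      List.range_sublist.mpr (by omega)
    have := List.Sublist.countP_le (p := fun m => decide (x ∈ pvAlive s k m)) hsub
    unfold pvMu
    omega
  · intro hlt
    by_contra hx
    have hmono : ∀ m ∈ List.range (s.length + 1),
        (fun m => decide (x ∈ pvAlive s k m)) m = true → (fun m => decide (m < n)) m = true := by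
      intro m _ hm
      rw [decide_eq_true_iff] at hm ⊢
      by_contra hge
      exact hx (pvAlive_down s k (by omega) hm)
    have h1 := List.countP_mono_left hmono
    have h2 : (List.range (s.length + 1)).countP (fun m => decide (m < n)) ≤ n :=
      le_trans (pvCountP_lt_le n (s.length + 1)) (Nat.min_le_left _ _)
    unfold pvMu at hlt
    omega

theorem pvMu_child (s : List (String × List String)) (k : String)
    (hp : pvAlive s k s.length = ∅) {x v : String}
    (hx : x ∈ pvAlive s k 0) (hv : v ∈ pvLook s x) : pvMu s k v < pvMu s k x := by
  have h0 : 0 < pvMu s k x := (pvMem_mu s k x hp 0).mp hx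
  by_contra hge
  have hvr : v ∈ pvAlive s k (pvMu s k x - 1) :=
    (pvMem_mu s k v hp _).mpr (by omega)
  have hxr : x ∈ pvAlive s k (pvMu s k x - 1) :=
    (pvMem_mu s k x hp _).mpr (by omega)
  have hstep : x ∈ pvAlive s k ((pvMu s k x - 1) + 1) := by
    show x ∈ Finset.filter _ _
    rw [Finset.mem_filter]
    refine ⟨hxr, ?_⟩
    exact List.any_eq_true.mpr ⟨v, hv, by simp [hvr]⟩
  have := (pvMem_mu s k x hp _).mp hstep
  omega

-- A's recursion computes the same list at any two sufficient fuels
theorem pvGoA_fuel (s : List (String × List String)) (k : String)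
    (hp : pvAlive s k s.length = ∅) :
    ∀ n m x, (s.any (fun p => p.1 == x) = true → x ∈ pvAlive s k 0) →
      pvMu s k x < n → pvMu s k x < m → pvGoA s n x = pvGoA s m x := by
  intro n
  induction n with
  | zero => intro m x _ h; omega
  | succ n ih =>
    intro m x hr hn hm
    match m with
    | 0 => omega
    | m + 1 =>
      simp only [pvGoA]
      by_cases hk : s.any (fun p => p.1 == x) = true
      · simp only [hk, if_true]
        apply PySem.List.foldl_congr_mem
        intro acc v hv
        have hx0 := hr hk
        have hlt := pvMu_child s k hp hx0 hv
        have hrv : s.any (fun p => p.1 == v) = true → v ∈ pvAlive s k 0 :=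
          fun hkv => pvRch_closed s k hx0 hv hkv
        rw [ih m v hrv (by omega) (by omega)]
      · simp [hk]

-- the central bridge: popping a sufficiently fuelled node appends exactly A's leaf list
theorem pvGoB_run (s : List (String × List String)) (k : String)
    (hp : pvAlive s k s.length = ∅) :
    ∀ d x st acc, (s.any (fun p => p.1 == x) = true → x ∈ pvAlive s k 0) →
      pvMu s k x < d →
      pvGoB s ((d, x) :: st) acc = pvGoB s st (acc ++ pvGoA s (s.length + 1) x) := by
  intro d
  induction d with
  | zero => intro x st acc _ h; omega
  | succ d ih =>
    intro x st acc hr hd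
    by_cases hk : s.any (fun p => p.1 == x) = true
    · have hx0 := hr hk
      rw [pvGoB]
      simp only [hk, dite_true]
      have hstep : ∀ (l : List String),
          (∀ v ∈ l, (s.any (fun p => p.1 == v) = true → v ∈ pvAlive s k 0) ∧ pvMu s k v < d) →
          ∀ st acc,
          pvGoB s (l.map (fun v => (d, v)) ++ st) acc
            = pvGoB s st (acc ++ l.foldl (fun a v => a ++ pvGoA s (s.length + 1) v) []) := by
        intro l hl
        induction l with
        | nil => intro st acc; simp
        | cons v t iht =>
          intro st acc
          simp only [List.map_cons, List.cons_append]
          rw [ih v _ acc (hl v (by simp)).1 (hl v (by simp)).2]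
          rw [iht (fun w hw => hl w (by simp [hw]))]
          rw [PySem.List.foldl_append_eq_flatMap, PySem.List.foldl_append_eq_flatMap]
          simp [List.flatMap_cons, List.append_assoc]
      have hchild : ∀ v ∈ pvLook s x,
          (s.any (fun p => p.1 == v) = true → v ∈ pvAlive s k 0) ∧ pvMu s k v < d := by
        intro v hv
        refine ⟨fun hkv => pvRch_closed s k hx0 hv hkv, ?_⟩
        have := pvMu_child s k hp hx0 hv
        omega
      rw [hstep (pvLook s x) hchild st acc]
      have hA : pvGoA s (s.length + 1) x
          = (pvLook s x).foldl (fun a v => a ++ pvGoA s s.length v) [] := by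
        simp [pvGoA, hk]
      rw [hA]
      have hfe : (pvLook s x).foldl (fun a v => a ++ pvGoA s (s.length + 1) v) []
          = (pvLook s x).foldl (fun a v => a ++ pvGoA s s.length v) [] := by
        apply PySem.List.foldl_congr_mem
        intro a v hv
        have h1 := pvMu_child s k hp hx0 hv
        have h2 := pvMu_le s k x hp
        have hrv : s.any (fun p => p.1 == v) = true → v ∈ pvAlive s k 0 :=
          fun hkv => pvRch_closed s k hx0 hv hkv
        rw [pvGoA_fuel s k hp (s.length + 1) s.length v hrv (by omega) (by omega)]
      rw [hfe]
    · rw [pvGoB]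
      have : pvGoA s (s.length + 1) x = [x] := by simp [pvGoA, hk]
      rw [this]
      simp [hk]

-- bridge from the closed-form precondition to the Kahn iteration: under Pre_, the
-- restricted Kahn elimination empties within s.length rounds
theorem pvRch_in_R (s : List (String × List String)) (k : String) (R : Finset String)
    (hk : s.any (fun p => p.1 == k) = true → k ∈ R)
    (hcl : ∀ x ∈ R, ∀ v ∈ pvLook s x, s.any (fun p => p.1 == v) = true → v ∈ R) :
    ∀ n, pvRch s k n ⊆ R := by
  intro n
  induction n with
  | zero =>
    simp only [pvRch]
    split
    · next h => intro x hx; rw [Finset.mem_singleton] at hx; subst hx; exact hk h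
    · exact fun x hx => absurd hx (Finset.notMem_empty x)
  | succ n ih =>
    intro x hx
    simp only [pvRch, Finset.mem_union, Finset.mem_biUnion] at hx
    rcases hx with hx | ⟨y, hy, hx⟩
    · exact ih hx
    · rw [List.mem_toFinset, List.mem_filter] at hx
      exact hcl y (ih hy) x hx.1 hx.2

theorem pvAlive_stab (s : List (String × List String)) (k : String) {n : Nat}
    (h : pvAlive s k n = pvAlive s k (n + 1)) :
    ∀ m, n ≤ m → pvAlive s k m = pvAlive s k n := by
  intro m hm
  induction m, hm using Nat.le_induction with
  | base => rfl
  | succ m hm ih =>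
    have e : pvAlive s k (m + 1) = pvAlive s k (n + 1) := by
      show Finset.filter _ (pvAlive s k m) = Finset.filter _ (pvAlive s k n)
      rw [ih]
    rw [e, ← h]

theorem pvAlive_card_ge (s : List (String × List String)) (k : String) (n : Nat)
    (h : ∀ m < n, pvAlive s k m ≠ pvAlive s k (m + 1)) :
    (pvAlive s k n).card + n ≤ (pvAlive s k 0).card := by
  induction n with
  | zero => omega
  | succ n ih =>
    have h1 := ih (fun m hm => h m (by omega))
    have hss : pvAlive s k (n + 1) ⊂ pvAlive s k n :=
      Finset.ssubset_iff_subset_ne.mpr ⟨pvAlive_mono s k n, (h n (by omega)).symm⟩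
    have := Finset.card_lt_card hss
    omega

theorem pvPre_alive (s : List (String × List String)) (k : String)
    (hp : Pre_dict_passval s k) : pvAlive s k s.length = ∅ := by
  obtain ⟨R, _, hk, hcl, hacyc⟩ := hp
  have hsub : pvAlive s k s.length ⊆ R := by
    have h1 : pvAlive s k s.length ⊆ pvAlive s k 0 := pvAlive_down s k (Nat.zero_le _)
    have h2 : pvAlive s k 0 ⊆ R := pvRch_in_R s k R hk hcl s.length
    exact fun x hx => h2 (h1 hx)
  by_cases hfix : ∃ m, m < s.length ∧ pvAlive s k m = pvAlive s k (m + 1)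
  · obtain ⟨m, hm, he⟩ := hfix
    have hL : pvAlive s k s.length = pvAlive s k m := pvAlive_stab s k he s.length (by omega)
    have hL1 : pvAlive s k (s.length + 1) = pvAlive s k m := pvAlive_stab s k he _ (by omega)
    by_contra hne
    obtain ⟨x, hxC, hno⟩ :=
      hacyc (pvAlive s k s.length) (Finset.mem_powerset.mpr hsub) hne
    have hx1 : x ∈ pvAlive s k (s.length + 1) := by rw [hL1, ← hL]; exact hxC
    have : ∃ v ∈ pvLook s x, v ∈ pvAlive s k s.length := by
      rw [show pvAlive s k (s.length + 1) = Finset.filter _ (pvAlive s k s.length) from rfl,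
          Finset.mem_filter] at hx1
      obtain ⟨v, hv, hvd⟩ := List.any_eq_true.mp hx1.2
      exact ⟨v, hv, of_decide_eq_true hvd⟩
    obtain ⟨v, hv, hvm⟩ := this
    exact hno v hv hvm
  · have hne : ∀ m < s.length, pvAlive s k m ≠ pvAlive s k (m + 1) :=
      fun m hm he => hfix ⟨m, hm, he⟩
    have h1 := pvAlive_card_ge s k s.length hne
    have h2 : (pvAlive s k 0).card ≤ s.length := by
      have hsub0 : pvAlive s k 0 ⊆ (s.map Prod.fst).toFinset := pvRch_le_keys s k s.length
      calc (pvAlive s k 0).card ≤ ((s.map Prod.fst).toFinset).card := Finset.card_le_card hsub0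
        _ ≤ (s.map Prod.fst).length := (s.map Prod.fst).toFinset_card_le
        _ = s.length := by simp
    have : (pvAlive s k s.length).card = 0 := by omega
    exact Finset.card_eq_zero.mp this

-- ===== VERDICT (by name: the statement is the Claim_ definition above) =====
theorem dict_passval_spec : Claim_equal_dict_passval := by
  intro s k _ hpre
  have hp : pvAlive s k s.length = ∅ := pvPre_alive s k hpre
  unfold Spec_dict_passval dict_passval dict_passval_alt
  have hr : s.any (fun p => p.1 == k) = true → k ∈ pvAlive s k 0 := by
    intro hk
    show k ∈ pvRch s k s.length
    have h0 : k ∈ pvRch s k 0 := by simp [pvRch, hk]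
    exact pvRch_mono s k (Nat.zero_le _) h0
  have hmu : pvMu s k k < s.length + 1 := by have := pvMu_le s k k hp; omega
  rw [pvGoB_run s k hp (s.length + 1) k [] [] hr hmu]
  simp [pvGoB]
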